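-- pv_equiv track=rewrite | github.com/rohanvinaik/VintageOptics | src/vintageoptics/integrations/exiftool_integration.py | _parse_metadata_groups
-- ===== SOURCE A (Python) =====
-- from typing import Dict, Optional
--
-- def _parse_metadata_groups(metadata: Dict) -> Dict:
--     """Organize metadata by groups"""
--     organized = {
--         'EXIF': {},
--         'MakerNotes': {},
--         'XMP': {},
--         'IPTC': {},
--         'Composite': {},
--         'Other': {}
--     }
--
--     for key, value in metadata.items():
--         if key.startswith('EXIF:'):
--             organized['EXIF'][key[5:]] = value
--         elif key.startswith('MakerNotes:'):
--             organized['MakerNotes'][key[11:]] = value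
--         elif key.startswith('XMP:'):
--             organized['XMP'][key[4:]] = value
--         elif key.startswith('IPTC:'):
--             organized['IPTC'][key[5:]] = value
--         elif key.startswith('Composite:'):
--             organized['Composite'][key[10:]] = value
--         else:
--             organized['Other'][key] = value
--
--     return organized
-- ===== SOURCE B (Python) =====
-- _GROUPS = ('EXIF', 'MakerNotes', 'XMP', 'IPTC', 'Composite')
--
-- def _parse_metadata_groups(metadata):
--     """Organize metadata by groups (data-driven: one partition + table lookup per key)."""
--     organized = {g: {} for g in _GROUPS + ('Other',)}
--     for key, value in metadata.items():
--         head, sep, rest = key.partition(':')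
--         if sep and head in _GROUPS:
--             organized[head][rest] = value
--         else:
--             organized['Other'][key] = value
--     return organized
-- ===== Notes on version B (the rewrite author's own statement) =====
-- stated objective: idiomatic
-- what changed: Replaces the five-branch startswith/hard-coded-slice ladder by a single str.partition on the first ':' plus a membership test of the head in a prefix table, so each key is scanned once instead of once per candidate prefix.
import Mathlib
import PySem

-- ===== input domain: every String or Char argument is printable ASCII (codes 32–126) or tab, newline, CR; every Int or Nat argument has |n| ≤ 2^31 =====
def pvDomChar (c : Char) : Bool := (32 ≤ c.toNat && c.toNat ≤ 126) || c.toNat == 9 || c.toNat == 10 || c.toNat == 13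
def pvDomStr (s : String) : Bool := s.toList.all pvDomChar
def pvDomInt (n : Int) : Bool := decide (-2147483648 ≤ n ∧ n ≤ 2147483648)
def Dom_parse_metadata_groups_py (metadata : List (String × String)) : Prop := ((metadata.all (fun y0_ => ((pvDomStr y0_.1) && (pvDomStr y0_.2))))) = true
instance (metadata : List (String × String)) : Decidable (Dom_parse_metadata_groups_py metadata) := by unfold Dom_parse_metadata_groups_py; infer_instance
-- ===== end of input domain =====

-- B replaces A's five-branch startswith/slice ladder by one partition on the first ':' plus a table lookup (idiomatic, data-driven).

-- ===== PORT A =====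
def pvStepA (org : PySem.Dict String (PySem.Dict String String)) (kv : String × String) :
    PySem.Dict String (PySem.Dict String String) :=
  let key := kv.1
  let value := kv.2
  if PySem.Str.startswith key "EXIF:" then
    org.modify "EXIF" .empty (fun d => d.insert (PySem.Str.slice key (some 5) none) value)
  else if PySem.Str.startswith key "MakerNotes:" then
    org.modify "MakerNotes" .empty (fun d => d.insert (PySem.Str.slice key (some 11) none) value)
  else if PySem.Str.startswith key "XMP:" then
    org.modify "XMP" .empty (fun d => d.insert (PySem.Str.slice key (some 4) none) value)
  else if PySem.Str.startswith key "IPTC:" then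
    org.modify "IPTC" .empty (fun d => d.insert (PySem.Str.slice key (some 5) none) value)
  else if PySem.Str.startswith key "Composite:" then
    org.modify "Composite" .empty (fun d => d.insert (PySem.Str.slice key (some 10) none) value)
  else
    org.modify "Other" .empty (fun d => d.insert key value)

def pvInitDict : PySem.Dict String (PySem.Dict String String) :=
  PySem.Dict.ofList [("EXIF", .empty), ("MakerNotes", .empty), ("XMP", .empty),
                     ("IPTC", .empty), ("Composite", .empty), ("Other", .empty)]

def parse_metadata_groups_py (metadata : List (String × String)) : List (String × List (String × String)) :=
  ((metadata.foldl pvStepA pvInitDict).items).map (fun p => (p.1, p.2.items))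

-- ===== PORT B =====
-- key.partition(':') on the character list: some (head, rest) if a ':' occurs, none otherwise
def pvPartitionColon : List Char → Option (List Char × List Char)
  | [] => none
  | c :: cs => if c = ':' then some ([], cs) else (pvPartitionColon cs).map (fun p => (c :: p.1, p.2))

def pvGroupNames : List String := ["EXIF", "MakerNotes", "XMP", "IPTC", "Composite"]

def pvStepB (org : PySem.Dict String (PySem.Dict String String)) (kv : String × String) :
    PySem.Dict String (PySem.Dict String String) :=
  let key := kv.1
  let value := kv.2
  match pvPartitionColon key.toList with
  | some (h, t) =>
    let hs := String.ofList h
    if hs ∈ pvGroupNames then org.modify hs .empty (fun d => d.insert (String.ofList t) value)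
    else org.modify "Other" .empty (fun d => d.insert key value)
  | none => org.modify "Other" .empty (fun d => d.insert key value)

def parse_metadata_groups_py_alt (metadata : List (String × String)) : List (String × List (String × String)) :=
  ((metadata.foldl pvStepB pvInitDict).items).map (fun p => (p.1, p.2.items))

-- ===== PRECONDITION & SPEC =====
def Spec_parse_metadata_groups_py (metadata : List (String × String)) (out : List (String × List (String × String))) : Prop := out = parse_metadata_groups_py_alt metadata
instance (metadata : List (String × String)) (out : List (String × List (String × String))) : Decidable (Spec_parse_metadata_groups_py metadata out) := by unfold Spec_parse_metadata_groups_py; infer_instance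

-- ===== CLAIM (what is proved, stated in full; the proofs are below) =====
def Claim_equal_parse_metadata_groups_py : Prop := ∀ (metadata : List (String × String)), Dom_parse_metadata_groups_py metadata → Spec_parse_metadata_groups_py metadata (parse_metadata_groups_py metadata)


-- ===== LEMMAS AND PROOFS =====

-- if pvPartitionColon returns none, the key contains no ':'
lemma pvPartition_none (cs : List Char) (h : pvPartitionColon cs = none) : ':' ∉ cs := by
  induction cs with
  | nil => simp
  | cons c cs ih =>
    by_cases hc : c = ':'
    · simp [pvPartitionColon, hc] at h
    · cases hp : pvPartitionColon cs with
      | none =>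
        intro hm
        rcases List.mem_cons.mp hm with h1 | h1
        · exact hc h1.symm
        · exact ih hp h1
      | some p => simp [pvPartitionColon, hc, hp] at h

-- if a ':' occurs, the key splits as head ++ ':' :: rest with no ':' in the head
lemma pvPartition_some (cs h t : List Char) (hp : pvPartitionColon cs = some (h, t)) :
    cs = h ++ ':' :: t ∧ ':' ∉ h := by
  induction cs generalizing h t with
  | nil => simp [pvPartitionColon] at hp
  | cons c cs ih =>
    by_cases hc : c = ':'
    · simp [pvPartitionColon, hc] at hp
      simp [hc, hp.1, hp.2]
    · cases hq : pvPartitionColon cs with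
      | none => simp [pvPartitionColon, hc, hq] at hp
      | some q =>
        simp [pvPartitionColon, hc, hq] at hp
        obtain ⟨rfl, rfl⟩ := hp
        obtain ⟨h1, h2⟩ := ih q.1 q.2 (by simp [hq])
        refine ⟨by simp [h1], ?_⟩
        intro hm
        rcases List.mem_cons.mp hm with e | e
        · exact hc e.symm
        · exact h2 e

-- "P:" is a prefix of "h:..t" (no ':' in P nor in h) exactly when P = h
lemma pvPrefix_colon_iff (h t P : List Char) (hh : ':' ∉ h) (hP : ':' ∉ P) :
    ((P ++ [':']) <+: (h ++ ':' :: t)) ↔ P = h := by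
  constructor
  · rintro ⟨u, hu⟩
    induction P generalizing h with
    | nil =>
      cases h with
      | nil => rfl
      | cons a h' => simp at hu; simp [← hu.1] at hh
    | cons p P' ih =>
      cases h with
      | nil => simp at hu; simp [hu.1] at hP
      | cons a h' =>
        simp at hu
        obtain ⟨rfl, hu2⟩ := hu
        have := ih h' (by simp at hh; exact hh.2) (by simp at hP; exact hP.2) (by simpa using hu2)
        simp [this]
  · rintro rfl
    exact ⟨t, by simp⟩

lemma pvStartswith_iff (key pre : String) :
    PySem.Str.startswith key pre = true ↔ pre.toList <+: key.toList := by
  simp [pysem]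

lemma pvStartswith_false_of_no_colon (key pre : String) (hc : ':' ∉ key.toList)
    (hp : ':' ∈ pre.toList) : PySem.Str.startswith key pre = false := by
  rw [Bool.eq_false_iff, Ne, pvStartswith_iff]
  exact fun h => hc (h.subset hp)

-- key[a:] is the character-list drop
lemma pvSlice_drop (key : String) (a : Int) (ha : 0 ≤ a) :
    PySem.Str.slice key (some a) none = String.ofList (key.toList.drop a.toNat) := by
  conv_lhs => rw [← String.ofList_toList (s := PySem.Str.slice key (some a) none)]
  congr 1
  simp [pysem, PySem.List.slice_from _ ha]

-- the two per-key loop bodies agree on every key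
lemma pvStep_eq (org : PySem.Dict String (PySem.Dict String String)) (kv : String × String) :
    pvStepA org kv = pvStepB org kv := by
  obtain ⟨key, value⟩ := kv
  cases hp : pvPartitionColon key.toList with
  | none =>
    have hc := pvPartition_none _ hp
    have f1 := pvStartswith_false_of_no_colon key "EXIF:" hc (by decide)
    have f2 := pvStartswith_false_of_no_colon key "MakerNotes:" hc (by decide)
    have f3 := pvStartswith_false_of_no_colon key "XMP:" hc (by decide)
    have f4 := pvStartswith_false_of_no_colon key "IPTC:" hc (by decide)
    have f5 := pvStartswith_false_of_no_colon key "Composite:" hc (by decide)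
    simp only [pvStepA, pvStepB, hp, f1, f2, f3, f4, f5]
    simp
  | some p =>
    obtain ⟨h, t⟩ := p
    obtain ⟨hk, hh⟩ := pvPartition_some _ _ _ hp
    have sw : ∀ pre P : String, pre.toList = P.toList ++ [':'] → ':' ∉ P.toList →
        (PySem.Str.startswith key pre = true ↔ P.toList = h) := by
      intro pre P hpre hP
      rw [pvStartswith_iff, hk, hpre]
      exact pvPrefix_colon_iff h t P.toList hh hP
    have sf : ∀ pre P : String, pre.toList = P.toList ++ [':'] → ':' ∉ P.toList →
        h ≠ P.toList → PySem.Str.startswith key pre = false := by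
      intro pre P hpre hP hne
      rw [Bool.eq_false_iff, Ne, sw pre P hpre hP]
      exact fun e => hne e.symm
    have drop_eq : key.toList.drop (h.length + 1) = t := by
      rw [hk, show h ++ ':' :: t = (h ++ [':']) ++ t by simp,
          show h.length + 1 = (h ++ [':']).length by simp]
      exact List.drop_left
    by_cases hg1 : h = "EXIF".toList
    · have st : PySem.Str.startswith key "EXIF:" = true :=
        (sw "EXIF:" "EXIF" (by decide) (by decide)).mpr hg1.symm
      have sl : PySem.Str.slice key (some 5) none = String.ofList t := by
        rw [pvSlice_drop key 5 (by norm_num)]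
        congr 1
        have := drop_eq
        rw [hg1] at this
        simpa using this
      simp only [pvStepA, pvStepB, hp, st]
      simp [sl, hg1, pvGroupNames]
    by_cases hg2 : h = "MakerNotes".toList
    · have st : PySem.Str.startswith key "MakerNotes:" = true :=
        (sw "MakerNotes:" "MakerNotes" (by decide) (by decide)).mpr hg2.symm
      have sl : PySem.Str.slice key (some 11) none = String.ofList t := by
        rw [pvSlice_drop key 11 (by norm_num)]
        congr 1
        have := drop_eq
        rw [hg2] at this
        simpa using this
      simp only [pvStepA, pvStepB, hp, sf "EXIF:" "EXIF" (by decide) (by decide) hg1, st]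
      simp [sl, hg2, pvGroupNames]
    by_cases hg3 : h = "XMP".toList
    · have st : PySem.Str.startswith key "XMP:" = true :=
        (sw "XMP:" "XMP" (by decide) (by decide)).mpr hg3.symm
      have sl : PySem.Str.slice key (some 4) none = String.ofList t := by
        rw [pvSlice_drop key 4 (by norm_num)]
        congr 1
        have := drop_eq
        rw [hg3] at this
        simpa using this
      simp only [pvStepA, pvStepB, hp, sf "EXIF:" "EXIF" (by decide) (by decide) hg1, sf "MakerNotes:" "MakerNotes" (by decide) (by decide) hg2, st]
      simp [sl, hg3, pvGroupNames]
    by_cases hg4 : h = "IPTC".toList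
    · have st : PySem.Str.startswith key "IPTC:" = true :=
        (sw "IPTC:" "IPTC" (by decide) (by decide)).mpr hg4.symm
      have sl : PySem.Str.slice key (some 5) none = String.ofList t := by
        rw [pvSlice_drop key 5 (by norm_num)]
        congr 1
        have := drop_eq
        rw [hg4] at this
        simpa using this
      simp only [pvStepA, pvStepB, hp, sf "EXIF:" "EXIF" (by decide) (by decide) hg1, sf "MakerNotes:" "MakerNotes" (by decide) (by decide) hg2, sf "XMP:" "XMP" (by decide) (by decide) hg3, st]
      simp [sl, hg4, pvGroupNames]
    by_cases hg5 : h = "Composite".toList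
    · have st : PySem.Str.startswith key "Composite:" = true :=
        (sw "Composite:" "Composite" (by decide) (by decide)).mpr hg5.symm
      have sl : PySem.Str.slice key (some 10) none = String.ofList t := by
        rw [pvSlice_drop key 10 (by norm_num)]
        congr 1
        have := drop_eq
        rw [hg5] at this
        simpa using this
      simp only [pvStepA, pvStepB, hp, sf "EXIF:" "EXIF" (by decide) (by decide) hg1, sf "MakerNotes:" "MakerNotes" (by decide) (by decide) hg2, sf "XMP:" "XMP" (by decide) (by decide) hg3, sf "IPTC:" "IPTC" (by decide) (by decide) hg4, st]
      simp [sl, hg5, pvGroupNames]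
    have hnm : String.ofList h ∉ pvGroupNames := by
      simp only [pvGroupNames, List.mem_cons, List.not_mem_nil, or_false]
      push Not
      refine ⟨?_, ?_, ?_, ?_, ?_⟩ <;>
        · intro e
          first
            | exact hg1 (by rw [← e]; simp)
            | exact hg2 (by rw [← e]; simp)
            | exact hg3 (by rw [← e]; simp)
            | exact hg4 (by rw [← e]; simp)
            | exact hg5 (by rw [← e]; simp)
    simp only [pvStepA, pvStepB, hp, sf "EXIF:" "EXIF" (by decide) (by decide) hg1, sf "MakerNotes:" "MakerNotes" (by decide) (by decide) hg2, sf "XMP:" "XMP" (by decide) (by decide) hg3, sf "IPTC:" "IPTC" (by decide) (by decide) hg4, sf "Composite:" "Composite" (by decide) (by decide) hg5]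
    simp [hnm]

-- ===== VERDICT (by name: the statement is the Claim_ definition above) =====
theorem parse_metadata_groups_py_spec : Claim_equal_parse_metadata_groups_py := by
  intro metadata _
  unfold Spec_parse_metadata_groups_py parse_metadata_groups_py parse_metadata_groups_py_alt
  rw [funext fun org => funext fun kv => pvStep_eq org kv]
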